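-- pv_equiv track=rewrite | github.com/Harsh-2323/bse_djanjo | selenium_scrape/management/commands/nse_ann_selenium.py | _choose_zip_member
-- ===== SOURCE A (Python) =====
-- def _choose_zip_member(namelist):
--     """Pick the most likely XBRL instance file inside a zip."""
--     candidates = [n for n in namelist if n.lower().endswith((".xml", ".xbrl"))]
--     if not candidates:
--         return None
--     pri = sorted(
--         candidates,
--         key=lambda n: (
--             0 if "inst" in n.lower() or "instance" in n.lower() else 1,
--             0 if "capmkt" in n.lower() else 1,
--             len(n)
--         )
--     )
--     return pri[0]
-- ===== SOURCE B (Python) =====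
-- def _choose_zip_member(namelist):
--     """Pick the most likely XBRL instance file inside a zip (staged filtering)."""
--     candidates = [n for n in namelist if n.lower().endswith((".xml", ".xbrl"))]
--     if not candidates:
--         return None
--     pool = [n for n in candidates if "inst" in n.lower()] or candidates
--     pool = [n for n in pool if "capmkt" in n.lower()] or pool
--     best = pool[0]
--     for n in pool[1:]:
--         if len(n) < len(best):
--             best = n
--     return best
-- ===== Notes on version B (the rewrite author's own statement) =====
-- stated objective: simpler
-- what changed: Replaces the stable sort under a 3-component tuple key (taking its first element) by staged filtering -- keep the 'inst' names if any, then the 'capmkt' names if any -- followed by a single first-wins minimum-length scan, with no sort at all.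
import Mathlib
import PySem

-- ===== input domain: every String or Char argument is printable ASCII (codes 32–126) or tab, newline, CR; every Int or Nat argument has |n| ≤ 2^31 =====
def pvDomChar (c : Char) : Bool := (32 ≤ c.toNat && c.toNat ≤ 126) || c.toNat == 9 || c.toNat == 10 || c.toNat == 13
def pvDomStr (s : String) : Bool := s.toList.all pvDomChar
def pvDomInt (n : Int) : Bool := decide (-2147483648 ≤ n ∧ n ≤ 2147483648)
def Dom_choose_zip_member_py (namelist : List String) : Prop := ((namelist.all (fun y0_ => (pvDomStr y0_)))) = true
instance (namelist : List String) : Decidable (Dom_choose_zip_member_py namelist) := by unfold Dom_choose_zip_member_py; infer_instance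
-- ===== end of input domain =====

-- B replaces the sort under a tuple key by staged filtering plus one min-length scan (simpler, no sort).

-- ===== PORT A =====
-- Python's '<' on 3-tuples is lexicographic; Mathlib's Prod '<' differs, so it is ported by hand (exact).
def pvLexLt3 (a b : Int × Int × Int) : Bool :=
  a.1 < b.1 || (a.1 == b.1 && (a.2.1 < b.2.1 || (a.2.1 == b.2.1 && a.2.2 < b.2.2)))

def choose_zip_member_py (namelist : List String) : Option String :=
  let candidates := namelist.filter (fun n =>
    PySem.Str.endswith (PySem.Str.lower n) ".xml" || PySem.Str.endswith (PySem.Str.lower n) ".xbrl")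
  if candidates = [] then none
  else
    let key : String → Int × Int × Int := fun n =>
      ((if PySem.Str.isIn "inst" (PySem.Str.lower n) || PySem.Str.isIn "instance" (PySem.Str.lower n) then 0 else 1),
       (if PySem.Str.isIn "capmkt" (PySem.Str.lower n) then 0 else 1),
       PySem.Str.len n)
    -- sorted(candidates, key=…): PySem.List.sorted IS xs.foldl (insertBy …) [] (sorted_eq_foldl_insertBy, rfl);
    -- written in that form directly because the key is a 3-tuple compared by pvLexLt3.
    let pri := candidates.foldl (fun acc n => PySem.List.insertBy (fun a b => pvLexLt3 (key a) (key b)) n acc) []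
    PySem.List.pyGet? pri 0

-- ===== PORT B =====
def choose_zip_member_py_alt (namelist : List String) : Option String :=
  let candidates := namelist.filter (fun n =>
    PySem.Str.endswith (PySem.Str.lower n) ".xml" || PySem.Str.endswith (PySem.Str.lower n) ".xbrl")
  if candidates = [] then none
  else
    let p1 := candidates.filter (fun n => PySem.Str.isIn "inst" (PySem.Str.lower n))
    let pool1 := if p1 = [] then candidates else p1
    let p2 := pool1.filter (fun n => PySem.Str.isIn "capmkt" (PySem.Str.lower n))
    let pool2 := if p2 = [] then pool1 else p2
    match pool2 with
    | [] => none
    | h :: t => some (t.foldl (fun best n => if PySem.Str.len n < PySem.Str.len best then n else best) h)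

-- ===== PRECONDITION & SPEC =====
def Spec_choose_zip_member_py (namelist : List String) (out : Option String) : Prop := out = choose_zip_member_py_alt namelist
instance (namelist : List String) (out : Option String) : Decidable (Spec_choose_zip_member_py namelist out) := by unfold Spec_choose_zip_member_py; infer_instance

-- ===== CLAIM (what is proved, stated in full; the proofs are below) =====
def Claim_equal_choose_zip_member_py : Prop := ∀ (namelist : List String), Dom_choose_zip_member_py namelist → Spec_choose_zip_member_py namelist (choose_zip_member_py namelist)

-- ===== LEMMAS AND PROOFS =====

-- running "first strict minimum" scan, as an Option accumulator
def omin {α : Type} (lt : α → α → Bool) (acc : Option α) (xs : List α) : Option α :=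
  xs.foldl (fun b x => match b with | none => some x | some m => if lt x m then some x else some m) acc

theorem omin_cons_none {α : Type} (lt : α → α → Bool) (x : α) (xs : List α) :
    omin lt none (x :: xs) = omin lt (some x) xs := rfl

theorem omin_cons_some {α : Type} (lt : α → α → Bool) (m x : α) (xs : List α) :
    omin lt (some m) (x :: xs) = omin lt (if lt x m then some x else some m) xs := rfl

theorem omin_some {α : Type} (lt : α → α → Bool) (m : α) (xs : List α) :
    omin lt (some m) xs = some (xs.foldl (fun b x => if lt x b then x else b) m) := by
  induction xs generalizing m with
  | nil => rfl
  | cons x xs ih =>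
      rw [omin_cons_some, List.foldl_cons]
      by_cases h : lt x m = true
      · rw [if_pos h, if_pos h]; exact ih x
      · rw [if_neg h, if_neg h]; exact ih m

theorem head?_insertBy {α : Type} (bef : α → α → Bool) (x : α) (l : List α) :
    (PySem.List.insertBy bef x l).head? =
      some (match l with | [] => x | y :: _ => if bef x y then x else y) := by
  cases l with
  | nil => simp [PySem.List.insertBy]
  | cons y ys =>
      by_cases h : bef x y = true <;> simp [PySem.List.insertBy, h]

theorem head?_foldl_insertBy {α : Type} (bef : α → α → Bool) (xs : List α) : ∀ (L : List α),
    (xs.foldl (fun acc x => PySem.List.insertBy bef x acc) L).head? = omin bef L.head? xs := by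
  induction xs with
  | nil => intro L; rfl
  | cons x xs ih =>
      intro L
      rw [List.foldl_cons, ih, head?_insertBy]
      cases L with
      | nil => simp [omin_cons_none]
      | cons y ys =>
          rw [List.head?_cons, omin_cons_some]
          by_cases h : bef x y = true <;> simp [h]

-- staged-filter lemmas: one lexicographic level vs. a "keep the flagged ones if any" filter
theorem stage_acc_true {α : Type} (flag : α → Bool) (lt lt' : α → α → Bool)
    (hlt : ∀ x m, lt x m = ((flag x && !flag m) || ((flag x == flag m) && lt' x m)))
    (xs : List α) : ∀ (m : α), flag m = true →
    omin lt (some m) xs = omin lt' (some m) (xs.filter flag) := by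
  induction xs with
  | nil => intro m _; rfl
  | cons x xs ih =>
      intro m hm
      by_cases hx : flag x = true
      · have hstep : lt x m = lt' x m := by rw [hlt, hx, hm]; simp
        rw [List.filter_cons_of_pos hx, omin_cons_some, omin_cons_some, hstep]
        by_cases h : lt' x m = true
        · rw [if_pos h]; exact ih x hx
        · rw [if_neg h]; exact ih m hm
      · have hx' : flag x = false := by simp_all
        have hstep : lt x m = false := by rw [hlt, hx', hm]; simp
        rw [List.filter_cons_of_neg (by simp [hx']), omin_cons_some, hstep,
          if_neg (by simp)]
        exact ih m hm

theorem stage_acc_false {α : Type} (flag : α → Bool) (lt lt' : α → α → Bool)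
    (hlt : ∀ x m, lt x m = ((flag x && !flag m) || ((flag x == flag m) && lt' x m)))
    (xs : List α) : ∀ (m : α), flag m = false →
    omin lt (some m) xs =
      if xs.filter flag = [] then omin lt' (some m) xs else omin lt' none (xs.filter flag) := by
  induction xs with
  | nil => intro m _; rfl
  | cons x xs ih =>
      intro m hm
      by_cases hx : flag x = true
      · have hstep : lt x m = true := by rw [hlt, hx, hm]; simp
        rw [List.filter_cons_of_pos hx, omin_cons_some, hstep, if_pos rfl,
          stage_acc_true flag lt lt' hlt xs x hx]
        have : (x :: xs.filter flag) ≠ [] := by simp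
        rw [if_neg this, omin_cons_none]
      · have hx' : flag x = false := by simp_all
        have hstep : lt x m = lt' x m := by rw [hlt, hx', hm]; simp
        rw [List.filter_cons_of_neg (by simp [hx']), omin_cons_some, hstep]
        by_cases h : lt' x m = true
        · rw [if_pos h, ih x hx']
          by_cases he : xs.filter flag = []
          · rw [if_pos he, if_pos he, omin_cons_some, if_pos h]
          · rw [if_neg he, if_neg he]
        · rw [if_neg h, ih m hm]
          by_cases he : xs.filter flag = []
          · rw [if_pos he, if_pos he, omin_cons_some, if_neg h]
          · rw [if_neg he, if_neg he]

theorem stage {α : Type} (flag : α → Bool) (lt lt' : α → α → Bool)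
    (hlt : ∀ x m, lt x m = ((flag x && !flag m) || ((flag x == flag m) && lt' x m)))
    (xs : List α) :
    omin lt none xs = omin lt' none (if xs.filter flag = [] then xs else xs.filter flag) := by
  cases xs with
  | nil => rfl
  | cons x xs =>
      rw [omin_cons_none]
      by_cases hx : flag x = true
      · rw [stage_acc_true flag lt lt' hlt xs x hx, List.filter_cons_of_pos hx,
          if_neg (by simp), omin_cons_none]
      · have hx' : flag x = false := by simp_all
        rw [stage_acc_false flag lt lt' hlt xs x hx', List.filter_cons_of_neg (by simp [hx'])]
        by_cases he : xs.filter flag = []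
        · rw [if_pos he, if_pos he, omin_cons_none]
        · rw [if_neg he, if_neg he]

-- "instance" in s implies "inst" in s, so A's first flag collapses to B's
theorem inst_or_instance (s : String) :
    (PySem.Str.isIn "inst" s || PySem.Str.isIn "instance" s) = PySem.Str.isIn "inst" s := by
  by_cases h : PySem.Str.isIn "instance" s = true
  · have h2 : PySem.Str.isIn "inst" s = true := by
      rw [PySem.Str.isIn_iff_infix] at h ⊢
      exact List.IsInfix.trans (by decide) h
    rw [h2, h]; rfl
  · simp_all

-- proof-side names (definitionally equal to the lambdas in the ports)
def kInst (n : String) : Bool := PySem.Str.isIn "inst" (PySem.Str.lower n)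
def kCap (n : String) : Bool := PySem.Str.isIn "capmkt" (PySem.Str.lower n)
def ltLen (x m : String) : Bool := decide (PySem.Str.len x < PySem.Str.len m)
def lt2 (x m : String) : Bool := (kCap x && !kCap m) || ((kCap x == kCap m) && ltLen x m)
def keyA (n : String) : Int × Int × Int :=
  ((if PySem.Str.isIn "inst" (PySem.Str.lower n) || PySem.Str.isIn "instance" (PySem.Str.lower n) then 0 else 1),
   (if PySem.Str.isIn "capmkt" (PySem.Str.lower n) then 0 else 1),
   PySem.Str.len n)

theorem lt1_shape (x m : String) :
    pvLexLt3 (keyA x) (keyA m) = ((kInst x && !kInst m) || ((kInst x == kInst m) && lt2 x m)) := by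
  unfold keyA
  rw [inst_or_instance (PySem.Str.lower x), inst_or_instance (PySem.Str.lower m)]
  unfold pvLexLt3 lt2 kInst kCap ltLen
  cases h1 : PySem.Str.isIn "inst" (PySem.Str.lower x) <;>
    cases h2 : PySem.Str.isIn "inst" (PySem.Str.lower m) <;>
    cases h3 : PySem.Str.isIn "capmkt" (PySem.Str.lower x) <;>
    cases h4 : PySem.Str.isIn "capmkt" (PySem.Str.lower m) <;>
    simp

theorem pyGet?_zero_head? {α : Type} (l : List α) : PySem.List.pyGet? l 0 = l.head? := by
  rw [show (0 : Int) = ((0 : Nat) : Int) from rfl, PySem.List.pyGet?_natCast]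
  cases l <;> simp

-- ===== VERDICT (by name: the statement is the Claim_ definition above) =====
theorem choose_zip_member_py_spec : Claim_equal_choose_zip_member_py := by
  intro namelist _
  unfold Spec_choose_zip_member_py choose_zip_member_py choose_zip_member_py_alt
  set cands := namelist.filter (fun n =>
    PySem.Str.endswith (PySem.Str.lower n) ".xml" || PySem.Str.endswith (PySem.Str.lower n) ".xbrl") with hc
  by_cases hnil : cands = []
  · simp [hnil]
  · simp only [if_neg hnil]
    show PySem.List.pyGet?
        (cands.foldl (fun acc n => PySem.List.insertBy (fun a b => pvLexLt3 (keyA a) (keyA b)) n acc) []) 0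
      = (match (if (if cands.filter kInst = [] then cands else cands.filter kInst).filter kCap = []
                then (if cands.filter kInst = [] then cands else cands.filter kInst)
                else (if cands.filter kInst = [] then cands else cands.filter kInst).filter kCap) with
         | [] => none
         | h :: t => some (t.foldl (fun best n =>
             if PySem.Str.len n < PySem.Str.len best then n else best) h))
    rw [pyGet?_zero_head?, head?_foldl_insertBy, show ([] : List String).head? = none from rfl,
      stage kInst (fun a b => pvLexLt3 (keyA a) (keyA b)) lt2 lt1_shape cands,
      stage kCap lt2 ltLen (fun _ _ => rfl)]
    set pool1 := if cands.filter kInst = [] then cands else cands.filter kInst with hp1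
    set pool2 := if pool1.filter kCap = [] then pool1 else pool1.filter kCap with hp2
    have hpool1 : pool1 ≠ [] := by
      rw [hp1]; by_cases h1 : cands.filter kInst = []
      · rw [if_pos h1]; exact hnil
      · rw [if_neg h1]; exact h1
    have hpool2 : pool2 ≠ [] := by
      rw [hp2]; by_cases h2 : pool1.filter kCap = []
      · rw [if_pos h2]; exact hpool1
      · rw [if_neg h2]; exact h2
    cases hp : pool2 with
    | nil => exact absurd hp hpool2
    | cons h t =>
        rw [omin_cons_none, omin_some]
        simp [ltLen]
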